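-- pv_equiv track=rewrite | github.com/zhaoyifei100/rasp_pi_chip_test | python/i2c_pi_gui/aves_to_py.py | convert_ref_name
-- ===== SOURCE A (Python) =====
-- def replace_func_name(func_name):
--     func_name_new=list(func_name)
--     for i_func_name in range(len(func_name_new)):
--         if(    (func_name_new[i_func_name]>='a' and func_name_new[i_func_name]<='z') \
--             or (func_name_new[i_func_name]>='A' and func_name_new[i_func_name]<='Z') \
--             or (func_name_new[i_func_name]>='0' and func_name_new[i_func_name]<='9') ):
--             func_name_new[i_func_name]=func_name_new[i_func_name]
--         elif(func_name[i_func_name]=="."):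
--             func_name_new[i_func_name]="p"
--         else:
--             func_name_new[i_func_name]="_"
--     func_name_new="".join(func_name_new)
--     return func_name_new
--
-- def convert_ref_name(block_lines):
--     return_list = []
--     for line in block_lines:
--         if(line[0]=="i"):
--             # sub function call
--             call_func_name_old = line.strip().split('"')[-2]
--             call_func_name_new = replace_func_name(call_func_name_old)
--             return_list.append("REF;;SUB "+call_func_name_new)
--         else:
--             #delete " "
--             return_list.append(line.replace(" ",""))
--     return return_list
-- ===== SOURCE B (Python) =====
-- # B: sanitizes via dot-segmentation: split the name on '.', underscore-map each
-- # segment, and rejoin with 'p' -- no per-character dot test or in-place list edit.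
-- def convert_ref_name(block_lines):
--     out = []
--     for line in block_lines:
--         if line.startswith("i"):
--             name = line.strip().split('"')[-2]
--             out.append("REF;;SUB " + "p".join(
--                 "".join(c if c.isalnum() else "_" for c in piece)
--                 for piece in name.split(".")))
--         else:
--             out.append(line.replace(" ", ""))
--     return out
-- ===== Notes on version B (the rewrite author's own statement) =====
-- stated objective: alternative
-- what changed: replace_func_name's indexed mutate-in-place character-classification loop is replaced by a segmentation pass: the name is split on '.', each segment has its non-alphanumerics underscored, and the segments are rejoined with 'p', so the dot case disappears from the per-character logic entirely.
import Mathlib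
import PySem

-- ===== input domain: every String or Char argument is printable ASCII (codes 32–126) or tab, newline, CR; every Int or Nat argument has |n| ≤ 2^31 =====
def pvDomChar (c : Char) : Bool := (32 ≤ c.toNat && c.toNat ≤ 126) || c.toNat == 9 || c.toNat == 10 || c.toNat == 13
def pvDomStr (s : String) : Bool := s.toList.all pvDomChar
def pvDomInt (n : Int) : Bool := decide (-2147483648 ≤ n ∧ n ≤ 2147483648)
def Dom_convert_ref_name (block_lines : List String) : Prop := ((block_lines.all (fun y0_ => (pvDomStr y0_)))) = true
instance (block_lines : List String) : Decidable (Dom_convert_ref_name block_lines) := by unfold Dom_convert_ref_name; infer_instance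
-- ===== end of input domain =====

-- B sanitizes a name by segmentation — split on '.', underscore the non-alphanumerics of each
-- segment, rejoin with 'p' — instead of A's indexed mutate-in-place classification loop; same values.

-- ===== PORT A =====
def replace_func_name (func_name : String) : String :=
  let func_name_new := func_name.toList
  let res := (PySem.List.pyRange 0 (func_name_new.length : Int) 1).foldl
    (fun acc i =>
      let c := PySem.List.pyGetD acc i ' '
      if ('a' ≤ c ∧ c ≤ 'z') ∨ ('A' ≤ c ∧ c ≤ 'Z') ∨ ('0' ≤ c ∧ c ≤ '9') then
        PySem.List.pySetD acc i c
      else if PySem.List.pyGetD func_name.toList i ' ' = '.' then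
        PySem.List.pySetD acc i 'p'
      else
        PySem.List.pySetD acc i '_')
    func_name_new
  String.ofList res

def convert_ref_name (block_lines : List String) : List String :=
  block_lines.foldl
    (fun return_list line =>
      if PySem.Str.pyGet? line 0 = some 'i' then
        return_list ++ ["REF;;SUB " ++ replace_func_name
          ((PySem.List.pyGet? ((PySem.Str.split? (PySem.Str.strip line) "\"").getD []) (-2)).getD "")]
      else
        return_list ++ [PySem.Str.replace line " " ""]) []

-- ===== PORT B =====
-- Source B's inner "".join(c if c.isalnum() else "_" for c in piece)
def pvSanitizePiece (piece : String) : String :=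
  String.ofList (piece.toList.map (fun c => if PySem.Chars.isalnum c then c else '_'))

def convert_ref_name_alt (block_lines : List String) : List String :=
  block_lines.foldl
    (fun out line =>
      if PySem.Str.startswith line "i" then
        let name := (PySem.List.pyGet? ((PySem.Str.split? (PySem.Str.strip line) "\"").getD []) (-2)).getD ""
        out ++ ["REF;;SUB " ++
          PySem.Str.join "p" (((PySem.Str.split? name ".").getD []).map pvSanitizePiece)]
      else
        out ++ [PySem.Str.replace line " " ""]) []

-- ===== PRECONDITION & SPEC =====
-- Pre_ excludes exactly the inputs where A raises IndexError: an empty line (line[0]),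
-- or a line starting with 'i' that contains no '"' (split('"')[-2] on a one-element list).
def Pre_convert_ref_name (block_lines : List String) : Prop :=
  ∀ line ∈ block_lines, line.toList ≠ [] ∧ (line.toList.head? = some 'i' → '"' ∈ line.toList)
instance (block_lines : List String) : Decidable (Pre_convert_ref_name block_lines) := by
  unfold Pre_convert_ref_name; infer_instance

def pvWitness_convert_ref_name : List String := ["int \"a.b\" zz", "W 12"]

def Spec_convert_ref_name (block_lines : List String) (out : List String) : Prop := out = convert_ref_name_alt block_lines
instance (block_lines : List String) (out : List String) : Decidable (Spec_convert_ref_name block_lines out) := by unfold Spec_convert_ref_name; infer_instance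

-- ===== CLAIM (what is proved, stated in full; the proofs are below) =====
def Claim_equal_convert_ref_name : Prop := ∀ (block_lines : List String), Dom_convert_ref_name block_lines → Pre_convert_ref_name block_lines → Spec_convert_ref_name block_lines (convert_ref_name block_lines)

-- ===== LEMMAS AND PROOFS =====

-- the per-character transform A applies (alnum kept, '.' → 'p', everything else → '_')
def pvCharA (c : Char) : Char :=
  if ('a' ≤ c ∧ c ≤ 'z') ∨ ('A' ≤ c ∧ c ≤ 'Z') ∨ ('0' ≤ c ∧ c ≤ '9') then c
  else if c = '.' then 'p' else '_'

-- B's per-character transform inside a segment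
def pvCharB (c : Char) : Char := if PySem.Chars.isalnum c then c else '_'
def pvUnder (cs : List Char) : List Char := cs.map pvCharB

-- the per-line transforms of the two ports
def pvLineA (line : String) : String :=
  if PySem.Str.pyGet? line 0 = some 'i' then
    "REF;;SUB " ++ replace_func_name
      ((PySem.List.pyGet? ((PySem.Str.split? (PySem.Str.strip line) "\"").getD []) (-2)).getD "")
  else
    PySem.Str.replace line " " ""

def pvLineB (line : String) : String :=
  if PySem.Str.startswith line "i" then
    "REF;;SUB " ++ PySem.Str.join "p"
      (((PySem.Str.split?
        ((PySem.List.pyGet? ((PySem.Str.split? (PySem.Str.strip line) "\"").getD []) (-2)).getD "")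
        ".").getD []).map pvSanitizePiece)
  else
    PySem.Str.replace line " " ""

-- A's index loop realises the per-character map
lemma pvLoopA (cs : List Char) (k : Nat) (hk : k ≤ cs.length) :
    (PySem.List.pyRange 0 (k : Int) 1).foldl
      (fun acc i =>
        let c := PySem.List.pyGetD acc i ' '
        if ('a' ≤ c ∧ c ≤ 'z') ∨ ('A' ≤ c ∧ c ≤ 'Z') ∨ ('0' ≤ c ∧ c ≤ '9') then
          PySem.List.pySetD acc i c
        else if PySem.List.pyGetD cs i ' ' = '.' then
          PySem.List.pySetD acc i 'p'
        else
          PySem.List.pySetD acc i '_') cs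
    = (cs.take k).map pvCharA ++ cs.drop k := by
  induction k with
  | zero => simp [PySem.List.pyRange]
  | succ k ih =>
    have hk' : k ≤ cs.length := Nat.le_of_succ_le hk
    have hklt : k < cs.length := hk
    have hcast : ((k + 1 : Nat) : Int) = (k : Int) + 1 := by push_cast; ring
    rw [hcast, PySem.List.pyRange_one_succ_right (by omega), List.foldl_append, ih hk']
    have hlenT : ((cs.take k).map pvCharA).length = k := by
      simp [Nat.min_eq_left hk']
    have hget : PySem.List.pyGetD ((cs.take k).map pvCharA ++ cs.drop k) (k : Int) ' ' = cs[k] := by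
      rw [PySem.List.pyGetD_natCast]
      rw [List.getD_eq_getElem _ _ (by simp; omega)]
      rw [List.getElem_append_right (by omega)]
      simp [Nat.min_eq_left hk']
    have hgetcs : PySem.List.pyGetD cs (k : Int) ' ' = cs[k] := by
      rw [PySem.List.pyGetD_natCast, List.getD_eq_getElem _ _ hklt]
    have hset' : ∀ v : Char, PySem.List.pySetD ((cs.take k).map pvCharA ++ cs.drop k) (k : Int) v
        = ((cs.take k).map pvCharA ++ [v]) ++ cs.drop (k+1) := by
      intro v
      have hlen : ((cs.take k).map pvCharA ++ cs.drop k).length = cs.length := by simp; omega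
      simp only [PySem.List.pySetD, PySem.List.pySet?, PySem.List.pyIdx?, hlen]
      have h0 : (0:Int) ≤ (k:Int) := by omega
      have h2 : (k:Int) < (cs.length:Int) := by omega
      rw [if_pos h0, if_pos h2]
      simp only [Int.toNat_natCast, Option.map_some, Option.getD_some]
      rw [List.set_append_right _ _ (by omega)]
      rw [hlenT, Nat.sub_self]
      rw [List.drop_eq_getElem_cons hklt, List.set_cons_zero]
      simp
    have htake : (cs.take (k+1)).map pvCharA = (cs.take k).map pvCharA ++ [pvCharA cs[k]] := by
      rw [List.take_add_one, List.getElem?_eq_getElem hklt]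
      rw [List.map_append]
      rfl
    simp only [List.foldl_cons, List.foldl_nil]
    rw [hget, hgetcs, hset', hset', hset', htake]
    simp only [pvCharA]
    split_ifs <;> rfl

lemma pvReplaceA (s : String) :
    replace_func_name s = String.ofList (s.toList.map pvCharA) := by
  have h := pvLoopA s.toList s.toList.length (le_refl _)
  unfold replace_func_name
  simp only [h]
  rw [List.take_length, List.drop_length, List.append_nil]

set_option maxRecDepth 10000 in
-- B's segment map agrees with A's branch on every non-dot ASCII code point
lemma pvCharEq (c : Char) (h : c.toNat < 128) (hd : c ≠ '.') : pvCharB c = pvCharA c := by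
  have hb : (List.range 128).all (fun n =>
      decide (Char.ofNat n ≠ '.' → pvCharB (Char.ofNat n) = pvCharA (Char.ofNat n))) = true := by
    decide
  have := (List.all_eq_true.mp hb) c.toNat (List.mem_range.mpr h)
  rw [Char.ofNat_toNat] at this
  exact of_decide_eq_true this hd

-- join helpers
lemma pvJoinConsNe (p y0 : List Char) (Y : List (List Char)) (h : Y ≠ []) :
    PySem.Chars.join p (y0 :: Y) = y0 ++ p ++ PySem.Chars.join p Y := by
  cases Y with
  | nil => exact absurd rfl h
  | cons b l => exact PySem.Chars.join_cons_cons p y0 b l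

lemma pvJoinSnocApp (p : List Char) (Y : List (List Char)) (y z : List Char) :
    PySem.Chars.join p (Y ++ [y ++ z]) = PySem.Chars.join p (Y ++ [y]) ++ z := by
  induction Y with
  | nil => simp [PySem.Chars.join_singleton]
  | cons y0 Y ih =>
    rw [List.cons_append, List.cons_append,
      pvJoinConsNe p y0 _ (by simp), pvJoinConsNe p y0 _ (by simp), ih]
    simp [List.append_assoc]

lemma pvJoinSnocNil (p : List Char) (Y : List (List Char)) (h : Y ≠ []) :
    PySem.Chars.join p (Y ++ [[]]) = PySem.Chars.join p Y ++ p := by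
  induction Y with
  | nil => exact absurd rfl h
  | cons y0 Y ih =>
    cases Y with
    | nil => simp [PySem.Chars.join_cons_cons, PySem.Chars.join_singleton]
    | cons b l =>
      rw [List.cons_append, pvJoinConsNe p y0 _ (by simp),
        pvJoinConsNe p y0 _ (by simp), ih (by simp)]
      simp [List.append_assoc]

-- the core bridge: splitting on '.', underscoring each segment and rejoining with 'p'
-- realises A's per-character map, for ASCII input
lemma pvGoKey (fuel : Nat) :
    ∀ (l cur : List Char) (acc : List (List Char)), l.length < fuel →
      (∀ c ∈ l, pvDomChar c = true) →
      PySem.Chars.join ['p'] ((PySem.Chars.splitOn.go ['.'] fuel l cur acc).map pvUnder)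
      = PySem.Chars.join ['p'] ((acc.reverse ++ [cur.reverse]).map pvUnder) ++ l.map pvCharA := by
  induction fuel with
  | zero => intro l cur acc hf; omega
  | succ fuel ih =>
    intro l cur acc hf hl
    cases l with
    | nil =>
      rw [PySem.Chars.splitOn.go]
      · simp
      · omega
    | cons c rest =>
      rw [PySem.Chars.splitOn.go]
      by_cases hc : c = '.'
      · subst hc
        have hpre : (['.'] : List Char).isPrefixOf ('.' :: rest) = true := by
          simp [List.isPrefixOf]
        rw [if_pos hpre]
        have hrest : ∀ x ∈ rest, pvDomChar x = true :=
          fun x hx => hl x (List.mem_cons_of_mem _ hx)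
        rw [ih _ _ _ (by simpa using hf) (by simpa using hrest)]
        have hY : ((cur.reverse :: acc).reverse ++ [List.reverse []]).map pvUnder
            = ((acc.reverse ++ [cur.reverse]).map pvUnder) ++ [[]] := by
          simp [pvUnder]
        rw [hY, pvJoinSnocNil _ _ (by simp)]
        have hdotA : pvCharA '.' = 'p' := by decide
        simp [hdotA, List.append_assoc]
      · have hpre : (['.'] : List Char).isPrefixOf (c :: rest) = false := by
          simp [List.isPrefixOf]
          exact fun h => absurd h.symm hc
        rw [hpre]
        simp only [Bool.false_eq_true, if_false]
        have hrest : ∀ x ∈ rest, pvDomChar x = true :=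
          fun x hx => hl x (List.mem_cons_of_mem _ hx)
        rw [ih _ _ _ (by simpa using hf) hrest]
        have hY : (acc.reverse ++ [(c :: cur).reverse]).map pvUnder
            = (acc.reverse.map pvUnder) ++ [pvUnder cur.reverse ++ [pvCharB c]] := by
          simp [pvUnder]
        rw [hY, pvJoinSnocApp]
        have hcd : pvDomChar c = true := hl c List.mem_cons_self
        have h128 : c.toNat < 128 := by
          unfold pvDomChar at hcd; simp at hcd; omega
        rw [pvCharEq c h128 hc]
        have hY2 : (acc.reverse ++ [cur.reverse]).map pvUnder
            = (acc.reverse.map pvUnder) ++ [pvUnder cur.reverse] := by simp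
        rw [hY2]
        simp [List.append_assoc]

lemma pvSanitizeEq (s : String) (hdom : ∀ c ∈ s.toList, pvDomChar c = true) :
    PySem.Str.join "p" (((PySem.Str.split? s ".").getD []).map pvSanitizePiece)
    = replace_func_name s := by
  have hsep : ("." : String).toList = ['.'] := rfl
  rw [PySem.Str.split?, hsep, PySem.Chars.split?]
  simp only [List.isEmpty_cons, Bool.false_eq_true, if_neg, not_false_eq_true,
    Option.map_some, Option.getD_some]
  have hmap : ∀ parts : List (List Char),
      ((parts.map String.ofList).map pvSanitizePiece).map String.toList = parts.map pvUnder := by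
    intro parts
    simp [pvSanitizePiece, pvUnder, pvCharB, Function.comp]
  rw [PySem.Str.join]
  rw [hmap]
  rw [PySem.Chars.splitOn]
  have hp : ("p" : String).toList = ['p'] := rfl
  rw [hp]
  rw [pvGoKey _ _ _ _ (by omega) hdom]
  have h0 : PySem.Chars.join ['p'] ((([] : List (List Char)).reverse ++ [List.reverse []]).map pvUnder)
      = [] := by
    simp [pvUnder, PySem.Chars.join_singleton]
  rw [h0, List.nil_append, pvReplaceA]

-- every character of every piece produced by split lies in the input or the loop state
lemma pvMemSplitGo (sep : List Char) :
    ∀ (fuel : Nat) (l cur : List Char) (acc : List (List Char)) (part : List Char),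
      part ∈ PySem.Chars.splitOn.go sep fuel l cur acc →
      ∀ c ∈ part, c ∈ l ∨ c ∈ cur ∨ ∃ p ∈ acc, c ∈ p := by
  intro fuel
  induction fuel with
  | zero =>
    intro l cur acc part hp c hc
    rw [PySem.Chars.splitOn.go] at hp
    simp only [List.mem_reverse, List.mem_cons] at hp
    rcases hp with h | h
    · subst h
      rcases List.mem_append.mp hc with h | h
      · exact Or.inr (Or.inl (List.mem_reverse.mp h))
      · exact Or.inl h
    · exact Or.inr (Or.inr ⟨part, h, hc⟩)
  | succ fuel ih =>
    intro l cur acc part hp c hc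
    cases l with
    | nil =>
      rw [PySem.Chars.splitOn.go] at hp
      simp only [List.mem_reverse, List.mem_cons] at hp
      rcases hp with h | h
      · subst h; exact Or.inr (Or.inl (List.mem_reverse.mp hc))
      · exact Or.inr (Or.inr ⟨part, h, hc⟩)
      · omega
    | cons x rest =>
      rw [PySem.Chars.splitOn.go] at hp
      by_cases hpre : sep.isPrefixOf (x :: rest) = true
      · simp only [hpre, if_true] at hp
        rcases ih _ _ _ _ hp c hc with h | h | h
        · exact Or.inl ((List.drop_sublist _ _).mem h)
        · simp at h
        · rcases h with ⟨p, hp1, hp2⟩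
          rcases List.mem_cons.mp hp1 with h | h
          · subst h; exact Or.inr (Or.inl (List.mem_reverse.mp hp2))
          · exact Or.inr (Or.inr ⟨p, h, hp2⟩)
      · simp only [hpre] at hp
        rcases ih _ _ _ _ hp c hc with h | h | h
        · exact Or.inl (List.mem_cons_of_mem _ h)
        · rcases List.mem_cons.mp h with h | h
          · subst h; exact Or.inl List.mem_cons_self
          · exact Or.inr (Or.inl h)
        · exact Or.inr (Or.inr h)

lemma pvMemSplit (s sep part : List Char) (hp : part ∈ PySem.Chars.splitOn s sep) :
    ∀ c ∈ part, c ∈ s := by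
  intro c hc
  rw [PySem.Chars.splitOn] at hp
  rcases pvMemSplitGo sep _ _ _ _ _ hp c hc with h | h | h
  · exact h
  · simp at h
  · rcases h with ⟨p, hp1, _⟩; simp at hp1

lemma pvMemStrip (l : List Char) (c : Char) (hc : c ∈ PySem.Chars.strip l) : c ∈ l := by
  simp only [PySem.Chars.strip, PySem.Chars.rstrip, PySem.Chars.lstrip, List.mem_reverse] at hc
  have h1 := (List.dropWhile_sublist _ (l := (List.dropWhile PySem.Chars.isspace l).reverse)).mem hc
  rw [List.mem_reverse] at h1
  exact (List.dropWhile_sublist _ (l := l)).mem h1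

-- the characters of the extracted name are characters of the line
lemma pvOldChars (line : String) (c : Char)
    (hc : c ∈ ((PySem.List.pyGet? ((PySem.Str.split? (PySem.Str.strip line) "\"").getD []) (-2)).getD "").toList) :
    c ∈ line.toList := by
  have hsep : ("\"" : String).toList = ['"'] := rfl
  rw [PySem.Str.split?] at hc
  rw [hsep] at hc
  rw [PySem.Chars.split?] at hc
  simp only [List.isEmpty_cons, if_neg, Bool.false_eq_true, not_false_eq_true,
    Option.map_some, Option.getD_some] at hc
  cases h : PySem.List.pyGet?
      ((PySem.Chars.splitOn (PySem.Str.strip line).toList ['"']).map String.ofList) (-2) with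
  | none => rw [h] at hc; simp at hc
  | some o =>
    rw [h] at hc
    simp only [Option.getD_some] at hc
    have ho := PySem.List.mem_of_pyGet?_eq_some _ h
    rcases List.mem_map.mp ho with ⟨part, hpart, rfl⟩
    rw [String.toList_ofList] at hc
    have h1 := pvMemSplit _ _ _ hpart c hc
    rw [PySem.Str.toList_strip] at h1
    exact pvMemStrip _ _ h1

lemma pvGuardList (l : List Char) :
    (PySem.List.pyGet? l 0 = some 'i') ↔ (List.isPrefixOf ['i'] l = true) := by
  cases l with
  | nil => simp [PySem.List.pyGet?, PySem.List.pyIdx?, List.isPrefixOf]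
  | cons x rest =>
    rw [PySem.List.pyGet?_zero_cons, List.isPrefixOf_cons₂]
    constructor
    · intro h
      have hx : x = 'i' := by injection h
      subst hx
      rfl
    · intro h
      have hx : ('i' = x) := beq_iff_eq.mp ((Bool.and_eq_true _ _).mp h).1
      rw [← hx]

lemma pvLineEq (line : String) (hdom : pvDomStr line = true) :
    pvLineA line = pvLineB line := by
  have hguard : (PySem.Str.pyGet? line 0 = some 'i') ↔ (PySem.Str.startswith line "i" = true) := by
    rw [PySem.Str.startswith_eq]
    have hi : ("i" : String).toList = ['i'] := rfl
    rw [PySem.Chars.startswith, hi]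
    rw [PySem.Str.pyGet?, PySem.Chars.pyGet?_eq_listPyGet?]
    exact pvGuardList line.toList
  unfold pvLineA pvLineB
  by_cases hg : PySem.Str.pyGet? line 0 = some 'i'
  · rw [if_pos hg, if_pos (hguard.mp hg)]
    rw [pvSanitizeEq]
    intro c hc
    have hcl := pvOldChars line c hc
    unfold pvDomStr at hdom
    exact List.all_eq_true.mp hdom c hcl
  · rw [if_neg hg, if_neg (fun h => hg (hguard.mpr h))]

-- ===== VERDICT (by name: the statement is the Claim_ definition above) =====
theorem convert_ref_name_spec : Claim_equal_convert_ref_name := by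
  intro bl hdom hpre
  unfold Spec_convert_ref_name
  have hdom' : ∀ line ∈ bl, pvDomStr line = true := by
    unfold Dom_convert_ref_name at hdom
    exact fun l hl => List.all_eq_true.mp hdom l hl
  have hA : convert_ref_name bl = bl.map pvLineA := by
    unfold convert_ref_name
    have hstep : ∀ (acc : List String) (line : String), line ∈ bl →
        (if PySem.Str.pyGet? line 0 = some 'i' then
          acc ++ ["REF;;SUB " ++ replace_func_name
            ((PySem.List.pyGet? ((PySem.Str.split? (PySem.Str.strip line) "\"").getD []) (-2)).getD "")]
        else acc ++ [PySem.Str.replace line " " ""])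
        = acc ++ [pvLineA line] := by
      intro acc line _
      unfold pvLineA
      rw [apply_ite (fun z => acc ++ [z])]
    rw [PySem.List.foldl_congr_mem _ _ _ _ hstep]
    rw [PySem.List.foldl_append_singleton_eq_map]
    simp
  have hB : convert_ref_name_alt bl = bl.map pvLineB := by
    unfold convert_ref_name_alt
    have hstep : ∀ (acc : List String) (line : String), line ∈ bl →
        (if PySem.Str.startswith line "i" then
          acc ++ ["REF;;SUB " ++ PySem.Str.join "p"
            (((PySem.Str.split?
              ((PySem.List.pyGet? ((PySem.Str.split? (PySem.Str.strip line) "\"").getD []) (-2)).getD "")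
              ".").getD []).map pvSanitizePiece)]
        else acc ++ [PySem.Str.replace line " " ""])
        = acc ++ [pvLineB line] := by
      intro acc line _
      unfold pvLineB
      rw [apply_ite (fun z => acc ++ [z])]
    rw [PySem.List.foldl_congr_mem _ _ _ _ hstep]
    rw [PySem.List.foldl_append_singleton_eq_map]
    simp
  rw [hA, hB]
  exact List.map_congr_left (fun line hl => pvLineEq line (hdom' line hl))
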